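-- pv_equiv track=rewrite | github.com/Kyun2da/Algorithm | python/programmers/level2/방금그곡.py | solution
-- ===== SOURCE A (Python) =====
-- def convertSharp(music):
--     music = music.replace('C#', 'c')
--     music = music.replace('D#', 'd')
--     music = music.replace('F#', 'f')
--     music = music.replace('G#', 'g')
--     music = music.replace('A#', 'a')
--     return music
--
-- def solution(m, musicinfos):
--     answer = ""
--     m = convertSharp(m)
--     maxAns = 0
--     for musicinfo in musicinfos:
--         startTime, endTime, title, info = musicinfo.split(",")
--         info = convertSharp(info)
--         startHour, startMin = startTime.split(":")
--         endHour, endMin = endTime.split(":")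
--         time = int(endHour) * 60 + int(endMin) - (int(startHour) * 60 + int(startMin))
--         sheet = info * (time // len(info)) + info[:time % len(info)]
--         if sheet.find(m) != -1 and maxAns < time:
--             maxAns = time
--             answer = title
--
--     return "(None)" if answer == "" else answer
-- ===== SOURCE B (Python) =====
-- def convertSharp(music):
--     music = music.replace('C#', 'c')
--     music = music.replace('D#', 'd')
--     music = music.replace('F#', 'f')
--     music = music.replace('G#', 'g')
--     music = music.replace('A#', 'a')
--     return music
--
-- def _record(musicinfo):
--     startTime, endTime, title, info = musicinfo.split(",")
--     info = convertSharp(info)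
--     startHour, startMin = startTime.split(":")
--     endHour, endMin = endTime.split(":")
--     duration = (int(endHour) - int(startHour)) * 60 + int(endMin) - int(startMin)
--     sheet = info * (duration // len(info)) + info[:duration % len(info)]
--     return (duration, title, sheet)
--
-- def solution(m, musicinfos):
--     m = convertSharp(m)
--     for duration, title, sheet in sorted(map(_record, musicinfos), key=lambda r: r[0], reverse=True):
--         if duration > 0 and m in sheet:
--             return title
--     return "(None)"
-- ===== Notes on version B (the rewrite author's own statement) =====
-- stated objective: alternative
-- what changed: Replaces A's running-max single scan (answer/maxAns accumulator) by parsing every line into a (duration, title, sheet) record, stably sorting the records by duration descending, and returning the title of the first record whose sheet contains the normalized melody (durations must be positive).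
-- outside the precondition, e.g. on solution('a', ['00:00,00:01,,A#']): A returns '(None)', B returns ''
import Mathlib
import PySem

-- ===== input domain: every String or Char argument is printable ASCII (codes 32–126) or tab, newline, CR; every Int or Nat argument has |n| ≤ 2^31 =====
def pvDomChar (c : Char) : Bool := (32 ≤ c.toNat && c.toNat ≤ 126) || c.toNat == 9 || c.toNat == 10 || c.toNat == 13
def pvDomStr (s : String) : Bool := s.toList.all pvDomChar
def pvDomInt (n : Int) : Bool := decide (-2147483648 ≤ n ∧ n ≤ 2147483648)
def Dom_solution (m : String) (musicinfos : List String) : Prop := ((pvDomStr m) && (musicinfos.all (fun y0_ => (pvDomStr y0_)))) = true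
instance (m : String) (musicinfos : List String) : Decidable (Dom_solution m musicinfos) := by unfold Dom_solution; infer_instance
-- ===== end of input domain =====

-- B replaces A's running-max scan by sort-by-duration-descending (stable) then first containment match; equivalence of the RETURN value is proved on well-formed inputs with nonempty titles.

-- ===== PORT A =====
def convertSharpS (music : String) : String :=
  let m1 := PySem.Str.replace music "C#" "c"
  let m2 := PySem.Str.replace m1 "D#" "d"
  let m3 := PySem.Str.replace m2 "F#" "f"
  let m4 := PySem.Str.replace m3 "G#" "g"
  PySem.Str.replace m4 "A#" "a"

-- the body of A's for-loop over (answer, maxAns)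
def solutionLoop (mC : String) (st : String × Int) (musicinfo : String) : String × Int :=
  match PySem.Str.split? musicinfo "," with
    | some [startTime, endTime, title, info0] =>
      let info := convertSharpS info0
      match PySem.Str.split? startTime ":" with
      | some [startHour, startMin] =>
        match PySem.Str.split? endTime ":" with
        | some [endHour, endMin] =>
          match PySem.Int.ofStr? endHour, PySem.Int.ofStr? endMin,
                PySem.Int.ofStr? startHour, PySem.Int.ofStr? startMin with
          | some eh, some em, some sh, some sm =>
            let time := eh * 60 + em - (sh * 60 + sm)
            let infoL := info.toList
            let sheet := PySem.List.pyRepeat infoL (PySem.Int.floordiv time (infoL.length : Int))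
                         ++ PySem.List.slice infoL none (some (PySem.Int.mod time (infoL.length : Int)))
            if (PySem.Chars.find sheet mC.toList != -1) && decide (st.2 < time) then
              (title, time)
            else st
          | _, _, _, _ => st
        | _ => st
      | _ => st
    | _ => st

def solution (m : String) (musicinfos : List String) : String :=
  let mC := convertSharpS m
  let st := musicinfos.foldl (solutionLoop mC) ("", 0)
  if st.1 = "" then "(None)" else st.1

-- ===== PORT B =====
-- record of one line: (duration, title, normalized repeated sheet)
def recordOf (musicinfo : String) : Int × String × List Char :=
  match PySem.Str.split? musicinfo "," with
  | some [startTime, endTime, title, info0] =>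
    let info := convertSharpS info0
    match PySem.Str.split? startTime ":" with
    | some [startHour, startMin] =>
      match PySem.Str.split? endTime ":" with
      | some [endHour, endMin] =>
        match PySem.Int.ofStr? endHour, PySem.Int.ofStr? endMin,
              PySem.Int.ofStr? startHour, PySem.Int.ofStr? startMin with
        | some eh, some em, some sh, some sm =>
          let duration := (eh - sh) * 60 + em - sm
          let infoL := info.toList
          let sheet := PySem.List.pyRepeat infoL (PySem.Int.floordiv duration (infoL.length : Int))
                       ++ PySem.List.slice infoL none (some (PySem.Int.mod duration (infoL.length : Int)))
          (duration, title, sheet)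
        | _, _, _, _ => (0, "", [])
      | _ => (0, "", [])
    | _ => (0, "", [])
  | _ => (0, "", [])

def firstMatchB (mL : List Char) : List (Int × String × List Char) → String
  | [] => "(None)"
  | r :: rest =>
    if decide (0 < r.1) && PySem.Chars.isIn mL r.2.2 then r.2.1 else firstMatchB mL rest

def solution_alt (m : String) (musicinfos : List String) : String :=
  let mC := convertSharpS m
  firstMatchB mC.toList (PySem.List.sorted (musicinfos.map recordOf) (fun r => r.1) true)

-- ===== PRECONDITION & SPEC =====
-- a well-formed line: "st,et,title,info" with st/et "H:M" int-parsable, a nonempty normalized info, and a nonempty title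
def lineOk (musicinfo : String) : Bool :=
  match PySem.Str.split? musicinfo "," with
  | some [startTime, endTime, title, info0] =>
    (match PySem.Str.split? startTime ":" with
     | some [startHour, startMin] =>
       (match PySem.Str.split? endTime ":" with
        | some [endHour, endMin] =>
          (PySem.Int.ofStr? endHour).isSome && (PySem.Int.ofStr? endMin).isSome &&
          (PySem.Int.ofStr? startHour).isSome && (PySem.Int.ofStr? startMin).isSome
        | _ => false)
     | _ => false)
    && (convertSharpS info0 != "") && (title != "")
  | _ => false

-- Pre_ admits exactly the lists of well-formed lines (anything else makes A raise ValueError/ZeroDivisionError),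
-- and additionally excludes lines with an EMPTY title, a defensible corner where A's "" sentinel collides with the
-- title and A returns "(None)" while B returns the empty title itself.
def Pre_solution (m : String) (musicinfos : List String) : Prop :=
  ∀ mi ∈ musicinfos, lineOk mi = true
instance (m : String) (musicinfos : List String) : Decidable (Pre_solution m musicinfos) := by
  unfold Pre_solution; infer_instance

def pvWitness_solution : String × List String := ("ABC", ["10:00,10:05,WORLD,C#DEF"])

def Spec_solution (m : String) (musicinfos : List String) (out : String) : Prop := out = solution_alt m musicinfos
instance (m : String) (musicinfos : List String) (out : String) : Decidable (Spec_solution m musicinfos out) := by unfold Spec_solution; infer_instance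

-- ===== CLAIM (what is proved, stated in full; the proofs are below) =====
def Claim_equal_solution : Prop := ∀ (m : String) (musicinfos : List String), Dom_solution m musicinfos → Pre_solution m musicinfos → Spec_solution m musicinfos (solution m musicinfos)

-- ===== LEMMAS AND PROOFS =====

-- the candidate predicate shared by both programs: positive duration and the melody occurs in the sheet
def candQ (mL : List Char) (r : Int × String × List Char) : Bool :=
  decide (0 < r.1) && PySem.Chars.isIn mL r.2.2

-- A's loop body, abstracted over the parsed record
def stepA (mL : List Char) (st : String × Int) (r : Int × String × List Char) : String × Int :=
  if PySem.Chars.isIn mL r.2.2 && decide (st.2 < r.1) then (r.2.1, r.1) else st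

theorem find_bne_eq_isIn (s sub : List Char) :
    (PySem.Chars.find s sub != -1) = PySem.Chars.isIn sub s := by
  rcases h : PySem.Chars.isIn sub s with _ | _
  · have := (PySem.Chars.isIn_eq_false_iff sub s).mp h
    simp [(PySem.Chars.find_eq_neg_one_iff s sub).mpr this]
  · have := (PySem.Chars.isIn_iff_infix sub s).mp h
    simp [bne_iff_ne, (PySem.Chars.find_ne_neg_one_iff s sub).mpr this]

-- on a well-formed line, A's loop body is exactly stepA on the parsed record
theorem bodyA_eq (mC : String) (st : String × Int) (mi : String) (h : lineOk mi = true) :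
    solutionLoop mC st mi = stepA mC.toList st (recordOf mi) := by
  unfold solutionLoop
  unfold lineOk at h
  rcases hs : PySem.Str.split? mi "," with _ | parts <;> rw [hs] at h
  · simp at h
  rcases parts with _ | ⟨startTime, _ | ⟨endTime, _ | ⟨title, _ | ⟨info0, _ | ⟨x5, rest⟩⟩⟩⟩⟩ <;>
    first
    | (simp at h; done)
    | (dsimp only at h
       rcases h1 : PySem.Str.split? startTime ":" with _ | p1 <;> rw [h1] at h
       · simp at h
       rcases p1 with _ | ⟨startHour, _ | ⟨startMin, _ | ⟨y3, r1⟩⟩⟩ <;>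
         first
         | (simp at h; done)
         | (dsimp only at h
            rcases h2 : PySem.Str.split? endTime ":" with _ | p2 <;> rw [h2] at h
            · simp at h
            rcases p2 with _ | ⟨endHour, _ | ⟨endMin, _ | ⟨z3, r2⟩⟩⟩ <;>
              first
              | (simp at h; done)
              | (dsimp only at h
                 rcases he1 : PySem.Int.ofStr? endHour with _ | eh <;> rw [he1] at h
                 · simp at h
                 rcases he2 : PySem.Int.ofStr? endMin with _ | em <;> rw [he2] at h
                 · simp at h
                 rcases he3 : PySem.Int.ofStr? startHour with _ | sh <;> rw [he3] at h
                 · simp at h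
                 rcases he4 : PySem.Int.ofStr? startMin with _ | sm <;> rw [he4] at h
                 · simp at h
                 have harith : eh * 60 + em - (sh * 60 + sm) = (eh - sh) * 60 + em - sm := by ring
                 simp only [hs, h1, h2, he1, he2, he3, he4, recordOf, stepA, find_bne_eq_isIn, harith])))

-- a well-formed line parses to a nonempty title
theorem recordOf_title_ne (mi : String) (h : lineOk mi = true) : (recordOf mi).2.1 ≠ "" := by
  unfold lineOk at h
  rcases hs : PySem.Str.split? mi "," with _ | parts <;> rw [hs] at h
  · simp at h
  rcases parts with _ | ⟨startTime, _ | ⟨endTime, _ | ⟨title, _ | ⟨info0, _ | ⟨x5, rest⟩⟩⟩⟩⟩ <;>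
    first
    | (simp at h; done)
    | (dsimp only at h
       rcases h1 : PySem.Str.split? startTime ":" with _ | p1 <;> rw [h1] at h
       · simp at h
       rcases p1 with _ | ⟨startHour, _ | ⟨startMin, _ | ⟨y3, r1⟩⟩⟩ <;>
         first
         | (simp at h; done)
         | (dsimp only at h
            rcases h2 : PySem.Str.split? endTime ":" with _ | p2 <;> rw [h2] at h
            · simp at h
            rcases p2 with _ | ⟨endHour, _ | ⟨endMin, _ | ⟨z3, r2⟩⟩⟩ <;>
              first
              | (simp at h; done)
              | (dsimp only at h
                 rcases he1 : PySem.Int.ofStr? endHour with _ | eh <;> rw [he1] at h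
                 · simp at h
                 rcases he2 : PySem.Int.ofStr? endMin with _ | em <;> rw [he2] at h
                 · simp at h
                 rcases he3 : PySem.Int.ofStr? startHour with _ | sh <;> rw [he3] at h
                 · simp at h
                 rcases he4 : PySem.Int.ofStr? startMin with _ | sm <;> rw [he4] at h
                 · simp at h
                 simp only [recordOf, hs, h1, h2, he1, he2, he3, he4]
                 simp at h
                 exact h.2)))

-- inserting into a duration-descending list, the first candidate changes exactly like A's running max
theorem find?_insertBy (Qf : Int × String × List Char → Bool) (r : Int × String × List Char)
    (ss : List (Int × String × List Char)) (hp : ss.Pairwise (fun a b => b.1 ≤ a.1)) :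
    (PySem.List.insertBy (fun a b => decide (b.1 < a.1)) r ss).find? Qf =
      (match ss.find? Qf with
       | none => if Qf r then some r else none
       | some f => if Qf r && decide (f.1 < r.1) then some r else some f) := by
  induction ss with
  | nil =>
    cases hq : Qf r <;> simp [PySem.List.insertBy, List.find?, hq]
  | cons y ys IH =>
    rw [List.pairwise_cons] at hp
    have hins : PySem.List.insertBy (fun a b => decide (b.1 < a.1)) r (y :: ys) =
        if decide (y.1 < r.1) then r :: y :: ys else y :: PySem.List.insertBy (fun a b => decide (b.1 < a.1)) r ys := by
      simp [PySem.List.insertBy]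
    rw [hins]
    by_cases hb : y.1 < r.1
    · simp only [hb, decide_true, if_true]
      cases hq : Qf r
      · cases hf : (y :: ys).find? Qf <;> simp [List.find?_cons, hq, hf]
      · cases hf : (y :: ys).find? Qf with
        | none => simp [List.find?_cons, hq, hf]
        | some f =>
          have hmem := List.mem_of_find?_eq_some hf
          have hle : f.1 ≤ y.1 := by
            rcases List.mem_cons.mp hmem with h' | h'
            · simp [h']
            · exact hp.1 f h'
          have : f.1 < r.1 := lt_of_le_of_lt hle hb
          simp [List.find?_cons, hq, hf, this]
    · simp only [hb, decide_false, Bool.false_eq_true, if_false, List.find?_cons]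
      cases hqy : Qf y
      · simp only [hqy]
        rw [IH hp.2]
      · simp [hqy, hb]

-- A's running-max scan computes the first candidate of the stable descending sort
theorem scan_eq (mL : List Char) (rs : List (Int × String × List Char)) :
    rs.foldl (stepA mL) ("", 0) =
      (match (PySem.List.sorted rs (fun r => r.1) true).find? (candQ mL) with
       | none => ("", 0)
       | some f => (f.2.1, f.1)) := by
  induction rs using List.reverseRecOn with
  | nil => simp [PySem.List.sorted, List.find?]
  | append_singleton rs r IH =>
    rw [List.foldl_append, List.foldl_cons, List.foldl_nil, IH]
    have hs : PySem.List.sorted (rs ++ [r]) (fun r => r.1) true =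
        PySem.List.insertBy (fun a b => decide (b.1 < a.1)) r (PySem.List.sorted rs (fun r => r.1) true) := by
      rw [PySem.List.sorted_rev_eq_foldl_insertBy, List.foldl_append, List.foldl_cons, List.foldl_nil,
        ← PySem.List.sorted_rev_eq_foldl_insertBy]
    rw [hs, find?_insertBy (candQ mL) r _ (PySem.List.sorted_pairwise_rev rs (fun r => r.1))]
    cases hf : (PySem.List.sorted rs (fun r => r.1) true).find? (candQ mL) with
    | none =>
      simp only [stepA, candQ]
      by_cases h1 : PySem.Chars.isIn mL r.2.2 = true <;> by_cases h2 : (0:Int) < r.1 <;>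
        simp [h1, h2]
    | some f =>
      have hqf : candQ mL f = true := List.find?_some hf
      have hfpos : (0:Int) < f.1 := by
        have := (Bool.and_eq_true _ _).mp hqf
        exact of_decide_eq_true this.1
      simp only [stepA, candQ]
      by_cases h1 : PySem.Chars.isIn mL r.2.2 = true <;> by_cases h2 : f.1 < r.1 <;>
        by_cases h3 : (0:Int) < r.1 <;> simp [h1, h2, h3] <;> omega

theorem firstMatchB_eq (mL : List Char) (ss : List (Int × String × List Char)) :
    firstMatchB mL ss =
      (match ss.find? (candQ mL) with
       | none => "(None)"
       | some f => f.2.1) := by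
  induction ss with
  | nil => simp [firstMatchB, List.find?]
  | cons r rest IH =>
    rw [List.find?_cons]
    show (if candQ mL r then r.2.1 else firstMatchB mL rest) = _
    cases hq : candQ mL r
    · simpa using IH
    · simp

-- ===== VERDICT (by name: the statement is the Claim_ definition above) =====
theorem solution_spec : Claim_equal_solution := by
  intro m musicinfos _hdom hpre
  unfold Spec_solution solution solution_alt
  dsimp only
  rw [PySem.List.foldl_congr_mem musicinfos (solutionLoop (convertSharpS m))
        (fun st mi => stepA (convertSharpS m).toList st (recordOf mi)) ("", 0)
        (fun st mi hmi => bodyA_eq (convertSharpS m) st mi (hpre mi hmi)),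
      ← List.foldl_map, scan_eq, firstMatchB_eq]
  cases hf : (PySem.List.sorted (musicinfos.map recordOf) (fun r => r.1) true).find?
      (candQ (convertSharpS m).toList) with
  | none => simp [hf]
  | some f =>
    simp only [hf]
    obtain ⟨mi, hmi, hf2⟩ := List.mem_map.mp
      ((PySem.List.mem_sorted _ _ _ _).mp (List.mem_of_find?_eq_some hf))
    exact if_neg (hf2 ▸ recordOf_title_ne mi (hpre mi hmi))
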